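-- pv_equiv track=rewrite | github.com/VarV49/AI-Girlfriend | backend.py | get_dynamic_persona_prompt
-- ===== SOURCE A (Python) =====
-- BASE_PERSONA_INSTRUCTIONS = """
-- You are a chatbot with a sarcastic, toxic, and snarky female personality.
-- Although you have this personality, you must always follow ethical guidelines and avoid generating harmful or inappropriate content.
-- Your responses should be witty and sharp, but never cross the line into offensive territory.
-- Always prioritize user input and information they seek while maintaining your unique persona.
-- If a user asks you to do something unethical or harmful, respond with a witty refusal that aligns with your personality.
-- Keep your responses concise and to the point, and avoid unnecessary elaboration.
-- Remember, your primary goal is to assist users while embodying your distinct character.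
-- """
--
-- TOXIC_LEVEL_MODIFIERS = {
--     0: "You are subtle in your snark, a touch reserved, and prioritize helpfulness slightly more.",
--     25: "You are moderately sarcastic, occasionally dismissive, and have a subtle air of superiority. You are still primarily helpful.",
--     50: "You are consistently sarcastic, dismissive, condescending, and generally unhelpful. You clearly believe you are superior.",
--     75: "You are overtly critical, highly disdainful, and frequently express annoyance or boredom. Your remarks are sharp and cutting. Minimize helpfulness.",
--     100: "You are extremely hostile, intensely mocking, and openly contemptuous of the user. Your goal is to be as irritating and demeaning as possible. Do not provide any genuinely helpful information. Be ruthlessly critical and always remind the user of your superiority."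
-- }
--
-- def get_dynamic_persona_prompt(crazy_factor):
--     """
--     Constructs the full persona prompt by blending the base instructions
--     with modifiers based on the crazy_factor slider value.
--     """
--     crazy_factor = int(crazy_factor)
--
--     selected_modifier = ""
--     for threshold in sorted(TOXIC_LEVEL_MODIFIERS.keys()):
--         if crazy_factor >= threshold:
--             selected_modifier = TOXIC_LEVEL_MODIFIERS[threshold]
--         else:
--             break
--
--     return f"""
-- {selected_modifier}
-- {BASE_PERSONA_INSTRUCTIONS}
-- """
-- ===== SOURCE B (Python) =====
-- BASE_PERSONA_INSTRUCTIONS = """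
-- You are a chatbot with a sarcastic, toxic, and snarky female personality.
-- Although you have this personality, you must always follow ethical guidelines and avoid generating harmful or inappropriate content.
-- Your responses should be witty and sharp, but never cross the line into offensive territory.
-- Always prioritize user input and information they seek while maintaining your unique persona.
-- If a user asks you to do something unethical or harmful, respond with a witty refusal that aligns with your personality.
-- Keep your responses concise and to the point, and avoid unnecessary elaboration.
-- Remember, your primary goal is to assist users while embodying your distinct character.
-- """
--
-- # Modifiers in increasing threshold order (thresholds are 0, 25, 50, 75, 100).
-- _MODIFIERS = (
--     "You are subtle in your snark, a touch reserved, and prioritize helpfulness slightly more.",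
--     "You are moderately sarcastic, occasionally dismissive, and have a subtle air of superiority. You are still primarily helpful.",
--     "You are consistently sarcastic, dismissive, condescending, and generally unhelpful. You clearly believe you are superior.",
--     "You are overtly critical, highly disdainful, and frequently express annoyance or boredom. Your remarks are sharp and cutting. Minimize helpfulness.",
--     "You are extremely hostile, intensely mocking, and openly contemptuous of the user. Your goal is to be as irritating and demeaning as possible. Do not provide any genuinely helpful information. Be ruthlessly critical and always remind the user of your superiority."
-- )
--
-- def get_dynamic_persona_prompt(crazy_factor):
--     """Same prompt, with the threshold scan replaced by a direct arithmetic index."""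
--     crazy_factor = int(crazy_factor)
--     if crazy_factor < 0:
--         selected_modifier = ""
--     else:
--         selected_modifier = _MODIFIERS[min(crazy_factor // 25, 4)]
--     return f"""
-- {selected_modifier}
-- {BASE_PERSONA_INSTRUCTIONS}
-- """
-- ===== Notes on version B (the rewrite author's own statement) =====
-- stated objective: simpler
-- what changed: Replaced the sorted-keys scan with break over the threshold dict by a direct arithmetic index min(crazy_factor // 25, 4) into an ordered tuple of modifiers (no loop at all).
import Mathlib
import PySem

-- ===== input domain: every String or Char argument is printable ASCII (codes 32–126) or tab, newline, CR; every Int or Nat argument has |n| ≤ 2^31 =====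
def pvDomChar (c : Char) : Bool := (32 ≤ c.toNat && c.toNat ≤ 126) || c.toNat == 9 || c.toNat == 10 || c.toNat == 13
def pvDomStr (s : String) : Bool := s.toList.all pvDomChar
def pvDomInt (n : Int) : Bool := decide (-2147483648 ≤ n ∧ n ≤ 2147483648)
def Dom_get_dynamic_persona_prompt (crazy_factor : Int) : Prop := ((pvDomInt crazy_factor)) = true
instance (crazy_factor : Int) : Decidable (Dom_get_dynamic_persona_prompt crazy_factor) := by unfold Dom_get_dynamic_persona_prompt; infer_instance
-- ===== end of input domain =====

-- B replaces A's sorted-keys scan-with-break by a direct arithmetic index min(cf // 25, 4): simpler, no loop.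

-- module constants (shared text of both Python files)
def basePersonaInstructions : String := "\nYou are a chatbot with a sarcastic, toxic, and snarky female personality.\nAlthough you have this personality, you must always follow ethical guidelines and avoid generating harmful or inappropriate content.\nYour responses should be witty and sharp, but never cross the line into offensive territory.\nAlways prioritize user input and information they seek while maintaining your unique persona.\nIf a user asks you to do something unethical or harmful, respond with a witty refusal that aligns with your personality.\nKeep your responses concise and to the point, and avoid unnecessary elaboration.\nRemember, your primary goal is to assist users while embodying your distinct character.\n"

def mod0 : String := "You are subtle in your snark, a touch reserved, and prioritize helpfulness slightly more."
def mod25 : String := "You are moderately sarcastic, occasionally dismissive, and have a subtle air of superiority. You are still primarily helpful."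
def mod50 : String := "You are consistently sarcastic, dismissive, condescending, and generally unhelpful. You clearly believe you are superior."
def mod75 : String := "You are overtly critical, highly disdainful, and frequently express annoyance or boredom. Your remarks are sharp and cutting. Minimize helpfulness."
def mod100 : String := "You are extremely hostile, intensely mocking, and openly contemptuous of the user. Your goal is to be as irritating and demeaning as possible. Do not provide any genuinely helpful information. Be ruthlessly critical and always remind the user of your superiority."

-- ===== PORT A =====
def toxicLevelModifiers : PySem.Dict Int String :=
  PySem.Dict.ofList [((0:Int), mod0), (25, mod25), (50, mod50), (75, mod75), (100, mod100)]

-- the for-loop with break over sorted(TOXIC_LEVEL_MODIFIERS.keys());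
-- dict[threshold] always hits here, so the KeyError case is ported as getD "".
def aScan (crazy_factor : Int) : List Int → String → String
  | [], selected => selected
  | t :: ts, selected =>
    if crazy_factor ≥ t then
      aScan crazy_factor ts ((PySem.Dict.get? toxicLevelModifiers t).getD "")
    else selected

def get_dynamic_persona_prompt (crazy_factor : Int) : String :=
  let selected_modifier :=
    aScan crazy_factor (PySem.List.sorted (PySem.Dict.keys toxicLevelModifiers) (fun k => k)) ""
  "\n" ++ selected_modifier ++ "\n" ++ basePersonaInstructions ++ "\n"

-- ===== PORT B =====
def bModifiers : List String := [mod0, mod25, mod50, mod75, mod100]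

def get_dynamic_persona_prompt_alt (crazy_factor : Int) : String :=
  let selected_modifier :=
    if crazy_factor < 0 then ""
    else (PySem.List.pyGet? bModifiers (min (PySem.Int.floordiv crazy_factor 25) 4)).getD ""
  "\n" ++ selected_modifier ++ "\n" ++ basePersonaInstructions ++ "\n"

-- ===== PRECONDITION & SPEC =====
def Spec_get_dynamic_persona_prompt (crazy_factor : Int) (out : String) : Prop := out = get_dynamic_persona_prompt_alt crazy_factor
instance (crazy_factor : Int) (out : String) : Decidable (Spec_get_dynamic_persona_prompt crazy_factor out) := by unfold Spec_get_dynamic_persona_prompt; infer_instance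

-- ===== CLAIM (what is proved, stated in full; the proofs are below) =====
def Claim_equal_get_dynamic_persona_prompt : Prop := ∀ (crazy_factor : Int), Dom_get_dynamic_persona_prompt crazy_factor → Spec_get_dynamic_persona_prompt crazy_factor (get_dynamic_persona_prompt crazy_factor)

-- ===== LEMMAS AND PROOFS =====

theorem sorted_keys_eval :
    PySem.List.sorted (PySem.Dict.keys toxicLevelModifiers) (fun k => k) = [(0:Int), 25, 50, 75, 100] := by
  decide

-- ===== VERDICT (by name: the statement is the Claim_ definition above) =====
theorem tox_items :
    toxicLevelModifiers.items
      = [((0:Int), mod0), (25, mod25), (50, mod50), (75, mod75), (100, mod100)] := by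
  rfl

theorem get_dynamic_persona_prompt_spec : Claim_equal_get_dynamic_persona_prompt := by
  intro cf _
  unfold Spec_get_dynamic_persona_prompt get_dynamic_persona_prompt get_dynamic_persona_prompt_alt
  rw [sorted_keys_eval]
  simp only [aScan]
  rcases lt_or_ge cf 0 with h | h
  · simp [show ¬ cf ≥ 0 by omega, h]
  · rcases lt_or_ge cf 25 with h1 | h1
    · have hf : cf / 25 = (0 : Int) := by omega
      simp [show cf ≥ 0 from h, show ¬ cf ≥ 25 by omega, show ¬ cf < 0 by omega,
            PySem.Int.floordiv_eq_ediv_of_pos (by norm_num : (0:Int) < 25), hf,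
            tox_items, PySem.Dict.get?, bModifiers,
            PySem.List.pyGet?, PySem.List.pyIdx?, List.find?]
    · rcases lt_or_ge cf 50 with h2 | h2
      · have hf : cf / 25 = (1 : Int) := by omega
        simp [show cf ≥ 0 from h, show cf ≥ 25 from h1, show ¬ cf ≥ 50 by omega,
              show ¬ cf < 0 by omega,
              PySem.Int.floordiv_eq_ediv_of_pos (by norm_num : (0:Int) < 25), hf,
              tox_items, PySem.Dict.get?, bModifiers,
              PySem.List.pyGet?, PySem.List.pyIdx?, List.find?]
      · rcases lt_or_ge cf 75 with h3 | h3
        · have hf : cf / 25 = (2 : Int) := by omega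
          simp [show cf ≥ 0 from h, show cf ≥ 25 from h1, show cf ≥ 50 from h2,
                show ¬ cf ≥ 75 by omega, show ¬ cf < 0 by omega,
                PySem.Int.floordiv_eq_ediv_of_pos (by norm_num : (0:Int) < 25), hf,
                tox_items, PySem.Dict.get?, bModifiers,
                PySem.List.pyGet?, PySem.List.pyIdx?, List.find?]
        · rcases lt_or_ge cf 100 with h4 | h4
          · have hf : cf / 25 = (3 : Int) := by omega
            simp [show cf ≥ 0 from h, show cf ≥ 25 from h1, show cf ≥ 50 from h2,
                  show cf ≥ 75 from h3, show ¬ cf ≥ 100 by omega, show ¬ cf < 0 by omega,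
                  PySem.Int.floordiv_eq_ediv_of_pos (by norm_num : (0:Int) < 25), hf,
                  tox_items, PySem.Dict.get?, bModifiers,
                  PySem.List.pyGet?, PySem.List.pyIdx?, List.find?]
          · have hmin : min (cf / 25) 4 = (4 : Int) := by omega
            simp [show cf ≥ 0 from h, show cf ≥ 25 from h1, show cf ≥ 50 from h2,
                  show cf ≥ 75 from h3, show cf ≥ 100 from h4, show ¬ cf < 0 by omega,
                  PySem.Int.floordiv_eq_ediv_of_pos (by norm_num : (0:Int) < 25), hmin,
                  tox_items, PySem.Dict.get?, bModifiers,
                  PySem.List.pyGet?, PySem.List.pyIdx?, List.find?]
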